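-- pv_equiv track=rewrite | github.com/itsolutionscorp/AutoStyle-Clustering | all_data/cs61a/untarred3/130.py | make_deductions
-- ===== SOURCE A (Python) =====
-- def make_deductions(possible_subsets, letters):
--     """Infers which letters must be in the word to be guessed, and
--     which letters must not be in the word.
--     A letter must be in the word if it is in every possible subset.
--     A letter is not in the word if it is not in any possible subset.
--
--     >>> letters = ['a', 'b', 'c', 'd', 'e', 'f']
--     >>> subsets = [['a', 'b', 'c'], ['b', 'a', 'e'], ['e', 'a', 'c']]
--     >>> present, not_present = make_deductions(subsets, letters)
--     >>> present
--     ['a']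
--     >>> not_present
--     ['d', 'f']
--     """
--     present, not_present = [],[]
--     i = 0
--     while i < len(letters):
--         times_in, times_not, k = 0,0,0
--         while k < len(possible_subsets):
--             if letters[i] in possible_subsets[k]:
--                 times_in += 1
--             elif letters[i] not in possible_subsets[k]:
--                 times_not += 1
--             if times_in == len(possible_subsets):
--                 present += [letters[i]]
--             if times_not == len(possible_subsets):
--                 not_present += [letters[i]]
--             k += 1
--         i += 1
--
--     return present, not_present
-- ===== SOURCE B (Python) =====
-- def make_deductions(possible_subsets, letters):
--     # One pass over the subsets builds the intersection and union as sets,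
--     # then each letter is classified by two O(1) membership tests.
--     inter = set(possible_subsets[0])
--     union = set()
--     for subset in possible_subsets:
--         inter.intersection_update(subset)
--         union.update(subset)
--     present = [l for l in letters if l in inter]
--     not_present = [l for l in letters if l not in union]
--     return present, not_present
-- ===== Notes on version B (the rewrite author's own statement) =====
-- stated objective: faster
-- what changed: Instead of scanning every subset per letter (and re-checking the counters inside the inner loop), B builds the intersection and union of all subsets as sets in one pass and then classifies each letter with two membership tests.
-- outside the precondition, e.g. on make_deductions([], ['a']): A returns ([], []), B raises IndexError; on make_deductions([], []): A returns ([], []), B raises IndexError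
import Mathlib
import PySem

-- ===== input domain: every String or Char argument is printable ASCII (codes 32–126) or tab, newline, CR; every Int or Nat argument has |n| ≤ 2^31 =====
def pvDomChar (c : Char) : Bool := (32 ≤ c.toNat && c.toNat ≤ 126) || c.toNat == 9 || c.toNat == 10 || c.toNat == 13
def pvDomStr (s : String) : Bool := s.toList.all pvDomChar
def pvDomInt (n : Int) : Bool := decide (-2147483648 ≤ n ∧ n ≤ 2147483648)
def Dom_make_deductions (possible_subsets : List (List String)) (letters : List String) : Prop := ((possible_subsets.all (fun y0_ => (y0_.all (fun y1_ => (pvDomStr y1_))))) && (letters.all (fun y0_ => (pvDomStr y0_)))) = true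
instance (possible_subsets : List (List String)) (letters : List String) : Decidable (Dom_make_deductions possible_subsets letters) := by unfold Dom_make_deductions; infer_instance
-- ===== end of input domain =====

-- B replaces A's per-letter scan of all subsets by one pass building the
-- intersection and union sets, then two membership tests per letter (faster in a timing run).


-- ===== PORT A =====
-- inner while loop over possible_subsets, state (times_in, times_not, present, not_present)
def mdInner (ℓ : String) (n : Int) : List (List String) → Int → Int → List String → List String → List String × List String
  | [], _, _, pres, np => (pres, np)
  | s :: rest, ti, tn, pres, np =>
    let ti' := if s.contains ℓ then ti + 1 else ti
    let tn' := if s.contains ℓ then tn else tn + 1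
    let pres' := if ti' = n then pres ++ [ℓ] else pres
    let np' := if tn' = n then np ++ [ℓ] else np
    mdInner ℓ n rest ti' tn' pres' np'

-- outer while loop over letters
def mdOuter (ss : List (List String)) : List String → List String → List String → List String × List String
  | [], pres, np => (pres, np)
  | ℓ :: rest, pres, np =>
    let r := mdInner ℓ (ss.length : Int) ss 0 0 pres np
    mdOuter ss rest r.1 r.2

def make_deductions (possible_subsets : List (List String)) (letters : List String) : List String × List String :=
  mdOuter possible_subsets letters [] []

-- ===== PORT B =====
def make_deductions_alt (possible_subsets : List (List String)) (letters : List String) : List String × List String :=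
  let init : PySem.Set String × PySem.Set String :=
    (PySem.Set.ofList possible_subsets.headI, PySem.Set.empty)
  let iu := possible_subsets.foldl
    (fun (st : PySem.Set String × PySem.Set String) subset =>
      (PySem.Set.inter st.1 subset, PySem.Set.update st.2 subset)) init
  let present := letters.filter (fun l => PySem.Set.contains iu.1 l)
  let not_present := letters.filter (fun l => !(PySem.Set.contains iu.2 l))
  (present, not_present)

-- ===== PRECONDITION & SPEC =====
-- Pre_ excludes an empty possible_subsets, on which A's list indexing possible_subsets[0] in B raises
-- IndexError (B's natural set-intersection needs a first subset) while A happens to return ([], []).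
def Pre_make_deductions (possible_subsets : List (List String)) (letters : List String) : Prop :=
  possible_subsets ≠ []
instance (possible_subsets : List (List String)) (letters : List String) : Decidable (Pre_make_deductions possible_subsets letters) := by unfold Pre_make_deductions; infer_instance

def pvWitness_make_deductions : List (List String) × List String := ([["a"]], ["a", "b"])

def Spec_make_deductions (possible_subsets : List (List String)) (letters : List String) (out : List String × List String) : Prop := out = make_deductions_alt possible_subsets letters
instance (possible_subsets : List (List String)) (letters : List String) (out : List String × List String) : Decidable (Spec_make_deductions possible_subsets letters out) := by unfold Spec_make_deductions; infer_instance

-- ===== CLAIM (what is proved, stated in full; the proofs are below) =====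
def Claim_equal_make_deductions : Prop := ∀ (possible_subsets : List (List String)) (letters : List String), Dom_make_deductions possible_subsets letters → Pre_make_deductions possible_subsets letters → Spec_make_deductions possible_subsets letters (make_deductions possible_subsets letters)

-- ===== LEMMAS AND PROOFS =====

-- counters: how many of the remaining subsets contain / do not contain ℓ
def cIn (ℓ : String) (ss : List (List String)) : Int := (ss.countP (fun s => s.contains ℓ) : Int)
def cNot (ℓ : String) (ss : List (List String)) : Int := (ss.countP (fun s => !(s.contains ℓ)) : Int)

theorem cIn_cons (ℓ : String) (s : List String) (r : List (List String)) :
    cIn ℓ (s :: r) = (if s.contains ℓ then 1 else 0) + cIn ℓ r := by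
  simp only [cIn, List.countP_cons]; split <;> push_cast <;> ring

theorem cNot_cons (ℓ : String) (s : List String) (r : List (List String)) :
    cNot ℓ (s :: r) = (if s.contains ℓ then 0 else 1) + cNot ℓ r := by
  simp only [cNot, List.countP_cons]
  by_cases hc : s.contains ℓ = true <;> simp [hc] <;> push_cast <;> ring

-- Characterisation of A's inner loop: since times_in/times_not grow by at most 1 per step,
-- they can hit n only at the last step, so each letter is appended at most once.
theorem mdInner_eq (ℓ : String) (n : Int) :
    ∀ (rest : List (List String)) (ti tn : Int) (pres np : List String),
      ti + rest.length ≤ n → tn + rest.length ≤ n →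
      mdInner ℓ n rest ti tn pres np =
        (pres ++ (if rest ≠ [] ∧ ti + cIn ℓ rest = n then [ℓ] else []),
         np ++ (if rest ≠ [] ∧ tn + cNot ℓ rest = n then [ℓ] else [])) := by
  intro rest
  induction rest with
  | nil => intro ti tn pres np _ _; simp [mdInner]
  | cons s r ih =>
    intro ti tn pres np hti htn
    simp only [List.length_cons, Nat.cast_add, Nat.cast_one] at hti htn
    simp only [mdInner]
    by_cases hc : s.contains ℓ = true
    · simp only [hc, if_true]
      have htnn : ¬ (tn = n) := by omega
      rw [if_neg htnn]
      have hcI : cIn ℓ (s :: r) = 1 + cIn ℓ r := by rw [cIn_cons, if_pos hc]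
      have hcN : cNot ℓ (s :: r) = cNot ℓ r := by rw [cNot_cons, if_pos hc]; ring
      rcases eq_or_ne r [] with hr | hr
      · subst hr
        have e1 : cIn ℓ [s] = 1 := by rw [hcI]; simp [cIn]
        have e2 : cNot ℓ [s] = 0 := by rw [hcN]; simp [cNot]
        simp only [mdInner, ne_eq, List.cons_ne_nil, not_false_iff, true_and, e1, e2, add_zero,
          if_neg htnn, List.append_nil]
        split_ifs with h1 h2 h2 <;> simp_all
      · have hrl : 0 < r.length := List.length_pos_of_ne_nil hr
        have hti' : ¬ (ti + 1 = n) := by omega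
        rw [if_neg hti']
        rw [ih (ti + 1) tn pres np (by omega) (by omega)]
        simp only [ne_eq, hr, not_false_iff, true_and, List.cons_ne_nil, hcI, hcN]
        rw [show ti + (1 + cIn ℓ r) = ti + 1 + cIn ℓ r from by ring]
    · rw [Bool.not_eq_true] at hc
      simp only [hc, Bool.false_eq_true, if_false]
      have htin : ¬ (ti = n) := by omega
      rw [if_neg htin]
      have hcI : cIn ℓ (s :: r) = cIn ℓ r := by rw [cIn_cons, hc]; simp
      have hcN : cNot ℓ (s :: r) = 1 + cNot ℓ r := by rw [cNot_cons, hc]; simp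
      rcases eq_or_ne r [] with hr | hr
      · subst hr
        have e1 : cIn ℓ [s] = 0 := by rw [hcI]; simp [cIn]
        have e2 : cNot ℓ [s] = 1 := by rw [hcN]; simp [cNot]
        simp only [mdInner, ne_eq, List.cons_ne_nil, not_false_iff, true_and, e1, e2, add_zero,
          if_neg htin, List.append_nil]
        split_ifs with h1 h2 h2 <;> simp_all
      · have hrl : 0 < r.length := List.length_pos_of_ne_nil hr
        have htn' : ¬ (tn + 1 = n) := by omega
        rw [if_neg htn']
        rw [ih ti (tn + 1) pres np (by omega) (by omega)]
        simp only [ne_eq, hr, not_false_iff, true_and, List.cons_ne_nil, hcI, hcN]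
        rw [show tn + (1 + cNot ℓ r) = tn + 1 + cNot ℓ r from by ring]

theorem cIn_eq_len_iff (ℓ : String) (ss : List (List String)) :
    (cIn ℓ ss = (ss.length : Int)) ↔ ss.all (fun s => s.contains ℓ) = true := by
  simp [cIn, Nat.cast_inj, List.countP_eq_length, List.all_eq_true]

theorem cNot_eq_len_iff (ℓ : String) (ss : List (List String)) :
    (cNot ℓ ss = (ss.length : Int)) ↔ ss.all (fun s => !(s.contains ℓ)) = true := by
  simp [cNot, Nat.cast_inj, List.countP_eq_length, List.all_eq_true]

theorem mdOuter_eq (ss : List (List String)) (hss : ss ≠ []) :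
    ∀ (L : List String) (pres np : List String),
      mdOuter ss L pres np =
        (pres ++ L.filter (fun ℓ => ss.all (fun s => s.contains ℓ)),
         np ++ L.filter (fun ℓ => ss.all (fun s => !(s.contains ℓ)))) := by
  intro L
  induction L with
  | nil => intro pres np; simp [mdOuter]
  | cons ℓ L ih =>
    intro pres np
    simp only [mdOuter]
    rw [mdInner_eq ℓ (ss.length : Int) ss 0 0 pres np (by omega) (by omega)]
    rw [ih]
    simp only [ne_eq, hss, not_false_iff, true_and, zero_add, List.filter_cons,
      cIn_eq_len_iff, cNot_eq_len_iff]
    rw [Prod.ext_iff]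
    constructor <;> · simp only; split_ifs <;> simp

theorem foldB_mem (x : String) :
    ∀ (ss : List (List String)) (i u : PySem.Set String),
      (x ∈ (ss.foldl (fun (st : PySem.Set String × PySem.Set String) subset =>
          (PySem.Set.inter st.1 subset, PySem.Set.update st.2 subset)) (i, u)).1
        ↔ x ∈ i ∧ ∀ s ∈ ss, x ∈ s) ∧
      (x ∈ (ss.foldl (fun (st : PySem.Set String × PySem.Set String) subset =>
          (PySem.Set.inter st.1 subset, PySem.Set.update st.2 subset)) (i, u)).2
        ↔ x ∈ u ∨ ∃ s ∈ ss, x ∈ s) := by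
  intro ss
  induction ss with
  | nil => intro i u; simp
  | cons s r ih =>
    intro i u
    simp only [List.foldl_cons]
    obtain ⟨h1, h2⟩ := ih (PySem.Set.inter i s) (PySem.Set.update u s)
    constructor
    · rw [h1, PySem.Set.mem_inter]
      simp only [List.mem_cons]
      constructor
      · rintro ⟨⟨hi, hs⟩, hall⟩
        exact ⟨hi, fun t ht => ht.elim (fun e => e ▸ hs) (hall t)⟩
      · rintro ⟨hi, hall⟩
        exact ⟨⟨hi, hall s (Or.inl rfl)⟩, fun t ht => hall t (Or.inr ht)⟩
    · rw [h2, PySem.Set.mem_update]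
      simp only [List.mem_cons]
      constructor
      · rintro ((hu | hs) | ⟨t, ht, hx⟩)
        · exact Or.inl hu
        · exact Or.inr ⟨s, Or.inl rfl, hs⟩
        · exact Or.inr ⟨t, Or.inr ht, hx⟩
      · rintro (hu | ⟨t, ht, hx⟩)
        · exact Or.inl (Or.inl hu)
        · exact ht.elim (fun e => Or.inl (Or.inr (e ▸ hx))) (fun ht2 => Or.inr ⟨t, ht2, hx⟩)

-- ===== VERDICT (by name: the statement is the Claim_ definition above) =====
theorem make_deductions_spec : Claim_equal_make_deductions := by
  intro ss L _ hpre
  unfold Spec_make_deductions make_deductions make_deductions_alt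
  rw [mdOuter_eq ss hpre L [] []]
  simp only [List.nil_append]
  obtain ⟨h0, t, rfl⟩ : ∃ h0 t, ss = h0 :: t := by
    cases ss with
    | nil => exact absurd rfl hpre
    | cons a b => exact ⟨a, b, rfl⟩
  refine Prod.ext ?_ ?_ <;> simp only [List.headI]
  · apply List.filter_congr
    intro l _
    rw [Bool.eq_iff_iff, PySem.Set.contains_iff,
      (foldB_mem l (h0 :: t) (PySem.Set.ofList h0) PySem.Set.empty).1,
      PySem.Set.mem_ofList]
    simp only [List.all_eq_true, List.contains_iff_mem]
    constructor
    · intro h; exact ⟨h h0 List.mem_cons_self, h⟩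
    · exact fun h => h.2
  · apply List.filter_congr
    intro l _
    rw [Bool.eq_iff_iff]
    simp only [List.all_eq_true, Bool.not_eq_true', ← Bool.not_eq_true,
      List.contains_iff_mem, PySem.Set.contains_iff,
      (foldB_mem l (h0 :: t) (PySem.Set.ofList h0) PySem.Set.empty).2]
    simp only [PySem.Set.empty, List.not_mem_nil, false_or]
    push Not
    constructor
    · rintro h s hs; exact h s hs
    · intro h s hs; exact h s hs
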